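-- pv_equiv track=rewrite | github.com/easyundercover/python-loops-lists-exercises | exercises/08.2-Divide_and_conquer/app.py | merge_two_list
-- ===== SOURCE A (Python) =====
-- def merge_two_list(list):
--     odd=[]
--     even=[]
--     for i in range(len(list)):
--         if list[i] % 2 == 0:
--             even.append(list[i])
--     for i in range(len(list)):
--         if list[i] % 2 != 0:
--             odd.append(list[i])
--     mergeTwoList = odd + even
--     return(mergeTwoList)
-- ===== SOURCE B (Python) =====
-- def merge_two_list(list):
--     odd = []
--     even = []
--     for x in list:
--         if x % 2 == 0:
--             even.append(x)
--         else:
--             odd.append(x)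
--     return odd + even
-- ===== Notes on version B (the rewrite author's own statement) =====
-- stated objective: simpler
-- what changed: Replaces A's two full index-based scans (one collecting evens, one collecting odds) with a single element-wise pass that partitions each element by parity into the two lists at once.
import Mathlib
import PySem

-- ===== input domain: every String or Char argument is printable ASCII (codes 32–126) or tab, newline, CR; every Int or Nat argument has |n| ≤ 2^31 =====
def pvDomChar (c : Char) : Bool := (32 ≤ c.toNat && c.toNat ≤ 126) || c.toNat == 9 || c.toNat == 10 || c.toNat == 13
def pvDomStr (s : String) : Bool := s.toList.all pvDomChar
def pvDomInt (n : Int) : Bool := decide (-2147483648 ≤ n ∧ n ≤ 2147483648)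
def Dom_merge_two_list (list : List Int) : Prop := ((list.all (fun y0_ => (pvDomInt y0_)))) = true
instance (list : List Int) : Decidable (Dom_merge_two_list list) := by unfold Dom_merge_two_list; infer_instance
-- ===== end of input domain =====

-- B replaces A's two sequential index-based filtering scans with a single element-wise pass
-- that partitions each element by parity into the odd/even lists (objective: simpler).


-- ===== PORT A =====
-- literal port: two index loops over range(len(list)); list[i] is always in range, ported as pyGetD with default 0
def merge_two_list (list : List Int) : List Int :=
  let even := (PySem.List.pyRange 0 (list.length : Int) 1).foldl
    (fun acc i => if PySem.Int.mod (PySem.List.pyGetD list i 0) 2 == 0 then acc ++ [PySem.List.pyGetD list i 0] else acc) []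
  let odd := (PySem.List.pyRange 0 (list.length : Int) 1).foldl
    (fun acc i => if PySem.Int.mod (PySem.List.pyGetD list i 0) 2 != 0 then acc ++ [PySem.List.pyGetD list i 0] else acc) []
  odd ++ even

-- ===== PORT B =====
-- single pass: partition each element by parity, then odd ++ even
def merge_two_list_alt (list : List Int) : List Int :=
  let p := list.foldl
    (fun (acc : List Int × List Int) x =>
      if PySem.Int.mod x 2 == 0 then (acc.1, acc.2 ++ [x]) else (acc.1 ++ [x], acc.2))
    ([], [])
  p.1 ++ p.2

-- ===== PRECONDITION & SPEC =====
def Spec_merge_two_list (list : List Int) (out : List Int) : Prop := out = merge_two_list_alt list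
instance (list : List Int) (out : List Int) : Decidable (Spec_merge_two_list list out) := by unfold Spec_merge_two_list; infer_instance

-- ===== CLAIM (what is proved, stated in full; the proofs are below) =====
def Claim_equal_merge_two_list : Prop := ∀ (list : List Int), Dom_merge_two_list list → Spec_merge_two_list list (merge_two_list list)

-- ===== LEMMAS AND PROOFS =====

-- B's pair-accumulator fold appends the parity partition of l to the accumulator components
theorem pv_alt_fold (l : List Int) (o e : List Int) :
    l.foldl
      (fun (acc : List Int × List Int) x =>
        if PySem.Int.mod x 2 == 0 then (acc.1, acc.2 ++ [x]) else (acc.1 ++ [x], acc.2))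
      (o, e)
    = (o ++ l.filter (fun x => PySem.Int.mod x 2 != 0), e ++ l.filter (fun x => PySem.Int.mod x 2 == 0)) := by
  induction l generalizing o e with
  | nil => simp
  | cons x xs ih =>
    simp only [List.foldl_cons, List.filter_cons]
    by_cases h : PySem.Int.mod x 2 == 0
    · have h' : (PySem.Int.mod x 2 != 0) = false := by rw [bne, h, Bool.not_true]
      rw [if_pos h, ih]
      simp only [h, h']
      simp
    · have h' : (PySem.Int.mod x 2 != 0) = true := by
        rw [bne, Bool.eq_false_iff.mpr h, Bool.not_false]
      rw [if_neg h, ih]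
      simp only [h', Bool.eq_false_iff.mpr h]
      simp

-- ===== VERDICT (by name: the statement is the Claim_ definition above) =====
theorem merge_two_list_spec : Claim_equal_merge_two_list := by
  intro list _
  show merge_two_list list = merge_two_list_alt list
  unfold merge_two_list merge_two_list_alt
  rw [PySem.List.foldl_pyRange_zero_pyGetD' list 0
        (fun acc v => if PySem.Int.mod v 2 == 0 then acc ++ [v] else acc) [],
      PySem.List.foldl_pyRange_zero_pyGetD' list 0
        (fun acc v => if PySem.Int.mod v 2 != 0 then acc ++ [v] else acc) [],
      PySem.List.foldl_append_if_eq_filter, PySem.List.foldl_append_if_eq_filter,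
      pv_alt_fold]
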